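-- pv_equiv track=rewrite | github.com/VIDA-NYU/prida | improvement-prediction/helping_feature_selectors/check_efficiency_effectiveness_tradeoff_containment_taxi.py | feature_in_front_of_random
-- ===== SOURCE A (Python) =====
-- RANDOM_PREFIX = 'random_feature_'
--
-- def feature_in_front_of_random(feature_name, ranking):
--     '''
--     This function checks whether there are random features before
--     feature_name
--     '''
--     random_not_seen = True
--     for feat in ranking:
--         if RANDOM_PREFIX in feat:
--             return 0
--         if feat == feature_name:
--             return 1
--     return 0
-- ===== SOURCE B (Python) =====
-- RANDOM_PREFIX = 'random_feature_'
--
-- def feature_in_front_of_random(feature_name, ranking):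
--     '''Position-based: feature wins iff its first occurrence strictly
--     precedes the first random-prefixed feature (len(ranking) = not found).'''
--     n = len(ranking)
--     rand_pos = next((i for i, feat in enumerate(ranking) if RANDOM_PREFIX in feat), n)
--     feat_pos = next((i for i, feat in enumerate(ranking) if feat == feature_name), n)
--     return 1 if feat_pos < rand_pos else 0
-- ===== Notes on version B (the rewrite author's own statement) =====
-- stated objective: alternative
-- what changed: Replaces the fused early-return scan with two independent positional lookups (first random-prefixed index, first exact-match index, len as not-found sentinel) compared at the end.
import Mathlib
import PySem

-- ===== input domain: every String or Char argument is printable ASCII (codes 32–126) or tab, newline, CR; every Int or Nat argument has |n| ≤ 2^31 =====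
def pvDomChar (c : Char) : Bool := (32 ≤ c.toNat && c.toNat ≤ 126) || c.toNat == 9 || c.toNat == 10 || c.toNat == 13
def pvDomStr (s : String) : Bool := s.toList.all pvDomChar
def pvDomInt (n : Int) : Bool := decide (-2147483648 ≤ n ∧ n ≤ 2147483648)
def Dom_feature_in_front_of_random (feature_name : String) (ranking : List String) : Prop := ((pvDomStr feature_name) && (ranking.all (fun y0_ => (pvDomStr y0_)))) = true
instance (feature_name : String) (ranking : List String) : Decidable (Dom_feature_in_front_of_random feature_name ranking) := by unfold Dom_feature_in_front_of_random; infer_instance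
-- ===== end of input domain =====

-- B replaces A's fused early-return scan with two independent first-index lookups compared at the end (alternative decomposition, same cost).


-- ===== PORT A =====
def feature_in_front_of_random (feature_name : String) (ranking : List String) : Int :=
  match ranking with
  | [] => 0
  | feat :: rest =>
    if PySem.Str.isIn "random_feature_" feat then 0
    else if feat == feature_name then 1
    else feature_in_front_of_random feature_name rest

-- ===== PORT B =====
def feature_in_front_of_random_alt (feature_name : String) (ranking : List String) : Int :=
  let n := ranking.length
  let rand_pos := (ranking.findIdx? (fun feat => PySem.Str.isIn "random_feature_" feat)).getD n
  let feat_pos := (ranking.findIdx? (fun feat => feat == feature_name)).getD n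
  if feat_pos < rand_pos then 1 else 0

-- ===== PRECONDITION & SPEC =====
def Spec_feature_in_front_of_random (feature_name : String) (ranking : List String) (out : Int) : Prop := out = feature_in_front_of_random_alt feature_name ranking
instance (feature_name : String) (ranking : List String) (out : Int) : Decidable (Spec_feature_in_front_of_random feature_name ranking out) := by unfold Spec_feature_in_front_of_random; infer_instance

-- ===== CLAIM (what is proved, stated in full; the proofs are below) =====
def Claim_equal_feature_in_front_of_random : Prop := ∀ (feature_name : String) (ranking : List String), Dom_feature_in_front_of_random feature_name ranking → Spec_feature_in_front_of_random feature_name ranking (feature_in_front_of_random feature_name ranking)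

-- ===== LEMMAS AND PROOFS =====
lemma fifor_agree (feature_name : String) (ranking : List String) :
    feature_in_front_of_random feature_name ranking
      = feature_in_front_of_random_alt feature_name ranking := by
  induction ranking with
  | nil => rfl
  | cons feat rest ih =>
    simp only [feature_in_front_of_random, feature_in_front_of_random_alt,
      List.findIdx?_cons, List.length_cons] at *
    by_cases hr : PySem.Str.isIn "random_feature_" feat
    · have hrL : PySem.Chars.isIn ['r','a','n','d','o','m','_','f','e','a','t','u','r','e','_'] feat.toList = true := hr
      simp [hrL]
    · have hrL : PySem.Chars.isIn ['r','a','n','d','o','m','_','f','e','a','t','u','r','e','_'] feat.toList = false := by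
        simpa using hr
      by_cases hf : feat == feature_name
      · have hfe : feat = feature_name := beq_iff_eq.mp hf
        subst hfe
        simp [hrL]
      · rw [ih]
        simp [hrL, hf]

-- ===== VERDICT (by name: the statement is the Claim_ definition above) =====
theorem feature_in_front_of_random_spec : Claim_equal_feature_in_front_of_random := by
  intro fn rk _
  unfold Spec_feature_in_front_of_random
  exact fifor_agree fn rk
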